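-- pv_equiv track=rewrite | github.com/cirosantilli/project-euler-solutions | solvers/719.py | is_s_number_root
-- ===== SOURCE A (Python) =====
-- def digit_sum(n: int) -> int:
--     s = 0
--     while n:
--         s += n % 10
--         n //= 10
--     return s
--
-- def is_s_number_root(root: int) -> bool:
--     """
--     Returns True if root^2 is an S-number.
--
--     The check works by recursively splitting the square from the right:
--       square = prefix * 10^k + suffix
--     and trying to write root as suffix + (a valid split-sum of prefix).
--     """
--     sq = root * root
--     if sq < 10:
--         return False  # cannot be split into 2+ parts
--
--     memo: dict[tuple[int, int], bool] = {}
--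
--     def dfs(num: int, target: int) -> bool:
--         """
--         Can the decimal digits of num be split into one or more parts that sum to target?
--         """
--         if target < 0 or target > num:
--             return False
--         if num == target:
--             return True
--         if num == 0:
--             return target == 0
--
--         # Necessary condition: any digit-splitting sum preserves value modulo 9.
--         if (num - target) % 9 != 0:
--             return False
--
--         key = (num, target)
--         cached = memo.get(key)
--         if cached is not None:
--             return cached
--
--         # Lower bound: splitting into single digits gives the minimal possible sum.
--         # This bound matters only when target is small, so avoid spending time
--         # computing digit sums for large targets.
--         if target < 120 and digit_sum(num) > target:
--             memo[key] = False
--             return False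
--
--         pow10 = 10
--         while pow10 <= num:
--             suffix = num % pow10
--             if suffix > target:
--                 break  # longer suffixes only increase the numeric value
--             prefix = num // pow10
--             if dfs(prefix, target - suffix):
--                 memo[key] = True
--                 return True
--             pow10 *= 10
--
--         memo[key] = False
--         return False
--
--     # We must use at least one split overall. Enforce that by taking at least one
--     # suffix at the top level (i.e. prefix must be non-zero here).
--     pow10 = 10
--     while pow10 <= sq:
--         suffix = sq % pow10
--         if suffix > root:
--             break
--         prefix = sq // pow10
--         remaining = root - suffix
--         if (prefix - remaining) % 9 == 0 and dfs(prefix, remaining):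
--             return True
--         pow10 *= 10
--
--     return False
-- ===== SOURCE B (Python) =====
-- def is_s_number_root(root: int) -> bool:
--     sq = root * root
--     if sq < 10:
--         return False
--     # L = number of decimal digits of sq
--     L = 0
--     n = sq
--     while n:
--         n //= 10
--         L += 1
--     # Bottom-up DP over suffix-start positions, processed k = L-1 .. 0.
--     # tables[j] = all sums (capped at <= root) of complete digit-splits of sq // 10**(k + 1 + j)
--     tables = []
--     for k in range(L - 1, -1, -1):
--         pk = sq // 10 ** k
--         cur = set()
--         if pk <= root:
--             cur.add(pk)
--         for j, prev in enumerate(tables):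
--             suffix = pk % 10 ** (j + 1)
--             for t in prev:
--                 if suffix + t <= root:
--                     cur.add(suffix + t)
--         tables.insert(0, cur)
--     return root in tables[0]
-- ===== Notes on version B (the rewrite author's own statement) =====
-- stated objective: alternative
-- what changed: Replaces A's memoized top-down DFS over (number, target) pairs with mod-9 and digit-sum pruning by a bottom-up dynamic program that tabulates, for each suffix-start position of the square, the set of achievable split-sums capped at root, and finally tests membership of root.
import Mathlib
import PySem

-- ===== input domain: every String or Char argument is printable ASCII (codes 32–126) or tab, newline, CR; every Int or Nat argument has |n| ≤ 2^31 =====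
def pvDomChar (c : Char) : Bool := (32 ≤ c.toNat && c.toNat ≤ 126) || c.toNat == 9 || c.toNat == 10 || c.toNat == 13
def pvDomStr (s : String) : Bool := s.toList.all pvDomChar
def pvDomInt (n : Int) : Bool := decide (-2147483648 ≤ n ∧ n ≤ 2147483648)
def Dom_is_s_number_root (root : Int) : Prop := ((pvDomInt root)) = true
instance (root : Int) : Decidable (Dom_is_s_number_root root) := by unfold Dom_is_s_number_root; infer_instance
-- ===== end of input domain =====

-- B replaces A's memoized top-down DFS (with mod-9 / digit-sum prunes) by a bottom-up
-- table of capped split-sums over suffix positions: an alternative algorithm, not faster.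


-- ===== PORT A =====
-- digit_sum: Python 'while n:' on an Int; ported with fuel n.toNat + 1, which is enough for
-- every n ≥ 0 (n //= 10 shrinks n.toNat each step); A only calls digit_sum on n ≥ 0
-- (Python would diverge for n < 0 — unreachable).
def digitSumGo : Nat → Int → Int → Int
  | 0, _, s => s
  | f + 1, n, s =>
    if n ≠ 0 then digitSumGo f (PySem.Int.floordiv n 10) (s + PySem.Int.mod n 10) else s

def digit_sum (n : Int) : Int := digitSumGo (n.toNat + 1) n 0

-- dfs and its inner 'while pow10 <= num' loop; pow10 is carried as 10^(k+1) with k the number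
-- of completed doublings (pow10 = 10 ↦ k = 0, pow10 *= 10 ↦ k+1); the memo dict is threaded
-- explicitly (Python mutates the closure's dict).  Both take a fuel parameter that merely
-- makes the recursion structural; the chosen top-level fuel is proved sufficient, so the
-- fuel-exhausted branch is never reached on any input.
mutual
def pyDfs : Nat → Int → Int → PySem.Dict (Int × Int) Bool → Bool × PySem.Dict (Int × Int) Bool
  | 0, _, _, memo => (false, memo)  -- fuel guard only, unreachable
  | fuel + 1, num, target, memo =>
    if target < 0 ∨ target > num then (false, memo)
    else if num = target then (true, memo)
    else if num = 0 then (decide (target = 0), memo)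
    else if PySem.Int.mod (num - target) 9 ≠ 0 then (false, memo)
    else
      match PySem.Dict.get? memo (num, target) with
      | some cached => (cached, memo)
      | none =>
        if target < 120 ∧ digit_sum num > target then
          (false, PySem.Dict.insert memo (num, target) false)
        else pyDfsLoop fuel num target 0 memo

def pyDfsLoop : Nat → Int → Int → Nat → PySem.Dict (Int × Int) Bool →
    Bool × PySem.Dict (Int × Int) Bool
  | 0, _, _, _, memo => (false, memo)  -- fuel guard only, unreachable
  | fuel + 1, num, target, k, memo =>
    let pow10 : Int := 10 ^ (k + 1)
    if pow10 ≤ num then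
      let suffix := PySem.Int.mod num pow10
      if suffix > target then (false, PySem.Dict.insert memo (num, target) false)
      else
        let pfx := PySem.Int.floordiv num pow10
        match pyDfs fuel pfx (target - suffix) memo with
        | (true, memo') => (true, PySem.Dict.insert memo' (num, target) true)
        | (false, memo') => pyDfsLoop fuel num target (k + 1) memo'
    else (false, PySem.Dict.insert memo (num, target) false)
end

-- the top-level 'while pow10 <= sq' loop (same pow10-as-10^(k+1) and fuel conventions)
def pyTopLoop : Nat → Int → Int → Nat → PySem.Dict (Int × Int) Bool → Bool
  | 0, _, _, _, _ => false  -- fuel guard only, unreachable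
  | fuel + 1, root, sq, k, memo =>
    let pow10 : Int := 10 ^ (k + 1)
    if pow10 ≤ sq then
      let suffix := PySem.Int.mod sq pow10
      if suffix > root then false
      else
        let pfx := PySem.Int.floordiv sq pow10
        let remaining := root - suffix
        if PySem.Int.mod (pfx - remaining) 9 = 0 then
          match pyDfs fuel pfx remaining memo with
          | (true, _) => true
          | (false, memo') => pyTopLoop fuel root sq (k + 1) memo'
        else pyTopLoop fuel root sq (k + 1) memo
    else false

def is_s_number_root (root : Int) : Bool :=
  let sq := root * root
  if sq < 10 then false
  else pyTopLoop (sq.toNat + 2) root sq 0 PySem.Dict.empty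

-- ===== PORT B =====
-- Source B: L = digit count of sq ('while n: n //= 10; L += 1'; fuel n.toNat + 1 as above)
def altLenGo : Nat → Int → Nat → Nat
  | 0, _, L => L
  | f + 1, n, L => if n ≠ 0 then altLenGo f (PySem.Int.floordiv n 10) (L + 1) else L

-- one iteration of Source B's outer 'for k' loop: build the set of capped split-sums for sq // 10**k
def altCur (sq root : Int) (k : Nat) (tables : List (PySem.Set Int)) : PySem.Set Int :=
  let pk := PySem.Int.floordiv sq (10 ^ k)
  let cur0 : PySem.Set Int :=
    if pk ≤ root then PySem.Set.add PySem.Set.empty pk else PySem.Set.empty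
  (PySem.List.enumerate tables).foldl
    (fun c p =>
      let suffix := PySem.Int.mod pk (10 ^ (p.1.toNat + 1))
      p.2.foldl (fun c t => if suffix + t ≤ root then PySem.Set.add c (suffix + t) else c) c)
    cur0

-- 'for k in range(L-1, -1, -1): … tables.insert(0, cur)' — after c iterations k = L-1-c;
-- recursion on the number of completed iterations c
def altBuild (sq root : Int) (L : Nat) : Nat → List (PySem.Set Int)
  | 0 => []
  | c + 1 =>
    let tables := altBuild sq root L c
    altCur sq root (L - 1 - c) tables :: tables

def is_s_number_root_alt (root : Int) : Bool :=
  let sq := root * root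
  if sq < 10 then false
  else
    let L := altLenGo (sq.toNat + 1) sq 0
    let tables := altBuild sq root L L
    -- 'root in tables[0]'; tables is nonempty here (L ≥ 2 since sq ≥ 10)
    PySem.Set.contains (tables.headD PySem.Set.empty) root

-- ===== PRECONDITION & SPEC =====
def Spec_is_s_number_root (root : Int) (out : Bool) : Prop := out = is_s_number_root_alt root
instance (root : Int) (out : Bool) : Decidable (Spec_is_s_number_root root out) := by unfold Spec_is_s_number_root; infer_instance

-- ===== CLAIM (what is proved, stated in full; the proofs are below) =====
def Claim_equal_is_s_number_root : Prop := ∀ (root : Int), Dom_is_s_number_root root → Spec_is_s_number_root root (is_s_number_root root)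

-- ===== LEMMAS AND PROOFS =====

-- The common mathematical content of both programs: SplitSum n s holds iff the decimal
-- digits of n can be split (right-to-left peels of m digits) into parts whose values sum to s.
inductive SplitSum : Int → Int → Prop
  | whole (n : Int) : SplitSum n n
  | peel (n t : Int) (m : Nat) (h1 : 1 ≤ m) (h2 : (10:Int) ^ m ≤ n)
      (ht : SplitSum (n / 10 ^ m) t) : SplitSum n (n % 10 ^ m + t)

lemma pow10_pos (m : Nat) : (0:Int) < 10 ^ m := by positivity

lemma splitSum_cases {n s : Int} (hs : SplitSum n s) :
    s = n ∨ ∃ (m : Nat) (t : Int), 1 ≤ m ∧ (10:Int) ^ m ≤ n ∧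
      SplitSum (n / 10 ^ m) t ∧ s = n % 10 ^ m + t := by
  cases hs with
  | whole n => exact Or.inl rfl
  | peel n t m h1 h2 ht => exact Or.inr ⟨m, t, h1, h2, ht, rfl⟩


lemma emod_le_self (a b : Int) (h : 0 ≤ a) (h2 : 0 < b) : a % b ≤ a := by
  have h3 := Int.ediv_add_emod a b
  have h4 : 0 ≤ b * (a / b) := mul_nonneg h2.le (Int.ediv_nonneg h h2.le)
  omega

lemma splitSum_nonneg {n s : Int} (hs : SplitSum n s) (h : 0 ≤ n) : 0 ≤ s := by
  induction hs with
  | whole n => exact h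
  | peel n t m h1 h2 ht ih =>
    have hp := pow10_pos m
    have h5 := Int.emod_nonneg n (ne_of_gt hp)
    have h6 := ih (Int.ediv_nonneg h hp.le)
    omega

lemma splitSum_le {n s : Int} (hs : SplitSum n s) (h : 0 ≤ n) : s ≤ n := by
  induction hs with
  | whole n => exact le_refl n
  | peel n t m h1 h2 ht ih =>
    have hp := pow10_pos m
    have hq : 0 ≤ n / 10 ^ m := Int.ediv_nonneg h hp.le
    have h6 := ih hq
    have h3 := Int.ediv_add_emod n (10 ^ m)
    have h7 : n / 10 ^ m ≤ 10 ^ m * (n / 10 ^ m) := by nlinarith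
    omega

lemma splitSum_mod9 {n s : Int} (hs : SplitSum n s) : (9:Int) ∣ (n - s) := by
  induction hs with
  | whole n => simp
  | peel n t m h1 h2 ht ih =>
    have h9 : (9:Int) ∣ (10 ^ m - 1) := by
      have : (10:Int) ^ m - 1 = (10 - 1) * (Finset.range m).sum (fun i => 10 ^ i) := by
        rw [mul_comm, geom_sum_mul]
      rw [this]; exact ⟨_, rfl⟩
    have h3 := Int.ediv_add_emod n (10 ^ m)
    obtain ⟨c, hc⟩ := ih
    obtain ⟨d, hd⟩ := h9
    refine ⟨(n / 10 ^ m) * d + c, ?_⟩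
    have : n - (n % 10 ^ m + t) = (n / 10 ^ m) * (10 ^ m - 1) + (n / 10 ^ m - t) := by
      ring_nf
      ring_nf at h3
      omega
    rw [this, hc, hd]; ring

-- clean digit sum used to reason about digit_sum's fuel loop
def dsum (n : Int) : Int :=
  if h : 0 < n then n % 10 + dsum (n / 10) else 0
termination_by n.toNat
decreasing_by
  have h1 : n / 10 < n := by
    apply Int.ediv_lt_of_lt_mul (by norm_num)
    nlinarith
  have h2 : 0 ≤ n / 10 := Int.ediv_nonneg (by omega) (by norm_num)
  omega

lemma dsum_nonpos {n : Int} (h : n ≤ 0) : dsum n = 0 := by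
  rw [dsum]; simp [show ¬ 0 < n by omega]

lemma dsum_unfold {n : Int} (h : 0 ≤ n) : dsum n = n % 10 + dsum (n / 10) := by
  rcases lt_or_eq_of_le h with h1 | h1
  · rw [dsum]; simp [h1]
  · rw [← h1]; simp [dsum_nonpos (le_refl 0)]

lemma dsum_le_self {n : Int} (h : 0 ≤ n) : dsum n ≤ n := by
  rcases lt_or_eq_of_le h with h1 | h1
  · rw [dsum]
    simp only [h1, dite_true]
    have h2 : 0 ≤ n / 10 := Int.ediv_nonneg (by omega) (by norm_num)
    have h3 := dsum_le_self h2
    have h4 := Int.ediv_add_emod n 10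
    have h5 : n / 10 ≤ 10 * (n / 10) := by nlinarith
    omega
  · rw [← h1]; simp [dsum_nonpos (le_refl 0)]
termination_by n.toNat
decreasing_by
  have h1 : n / 10 < n := by
    apply Int.ediv_lt_of_lt_mul (by norm_num)
    nlinarith
  have h2 : 0 ≤ n / 10 := Int.ediv_nonneg (by omega) (by norm_num)
  omega

-- splitting off the low m digits splits the digit sum
lemma dsum_add_mul_pow : ∀ (m : Nat) (p r : Int), 0 ≤ p → 0 ≤ r → r < 10 ^ m →
    dsum (p * 10 ^ m + r) = dsum p + dsum r := by
  intro m
  induction m with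
  | zero =>
    intro p r hp hr0 hr1
    have hr : r = 0 := by simp at hr1; omega
    subst hr
    simp [dsum_nonpos (le_refl (0:Int))]
  | succ m ih =>
    intro p r hp hr0 hr1
    have hpw := pow10_pos m
    have hxeq : p * 10 ^ (m + 1) + r = r + 10 * (p * 10 ^ m) := by ring
    have hx0 : 0 ≤ p * 10 ^ (m + 1) + r := by positivity
    have h1 : (p * 10 ^ (m + 1) + r) % 10 = r % 10 := by
      rw [hxeq, Int.add_mul_emod_self_left]
    have h2 : (p * 10 ^ (m + 1) + r) / 10 = p * 10 ^ m + r / 10 := by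
      rw [hxeq, Int.add_mul_ediv_left _ _ (by norm_num : (10:Int) ≠ 0)]
      ring
    have hr2 : r / 10 < 10 ^ m := by
      rw [Int.ediv_lt_iff_lt_mul (by norm_num)]
      calc r < 10 ^ (m + 1) := hr1
        _ = 10 ^ m * 10 := by ring
    have hr3 : 0 ≤ r / 10 := Int.ediv_nonneg hr0 (by norm_num)
    have hih := ih p (r / 10) hp hr3 hr2
    have h4 := dsum_unfold hx0
    have h5 := dsum_unfold hr0
    rw [h1, h2, hih] at h4
    omega

lemma digitSumGo_eq : ∀ (f : Nat) (n s : Int), 0 ≤ n → n.toNat < f →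
    digitSumGo f n s = s + dsum n := by
  intro f
  induction f with
  | zero => intro n s h0 hf; omega
  | succ f ih =>
    intro n s h0 hf
    by_cases hn : n = 0
    · subst hn
      simp [digitSumGo, dsum_nonpos (le_refl (0:Int))]
    · have hpos : 0 < n := by omega
      have hfd : PySem.Int.floordiv n 10 = n / 10 :=
        PySem.Int.floordiv_eq_ediv_of_pos (by norm_num)
      have hmd : PySem.Int.mod n 10 = n % 10 :=
        PySem.Int.mod_eq_emod_of_pos (by norm_num)
      have hlt : n / 10 < n := by
        apply Int.ediv_lt_of_lt_mul (by norm_num)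
        nlinarith
      have hge : 0 ≤ n / 10 := Int.ediv_nonneg h0 (by norm_num)
      have := ih (n / 10) (s + n % 10) hge (by omega)
      simp only [digitSumGo, hn, if_true, ne_eq, not_false_eq_true, hfd, hmd]
      rw [this, dsum_unfold h0]
      omega

lemma digit_sum_eq {n : Int} (h : 0 ≤ n) : digit_sum n = dsum n := by
  have := digitSumGo_eq (n.toNat + 1) n 0 h (by omega)
  simpa [digit_sum] using this

lemma splitSum_dsum_le {n s : Int} (hs : SplitSum n s) (h : 0 ≤ n) : dsum n ≤ s := by
  induction hs with
  | whole n => exact dsum_le_self h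
  | peel n t m h1 h2 ht ih =>
    have hp := pow10_pos m
    have hq : 0 ≤ n / 10 ^ m := Int.ediv_nonneg h hp.le
    have hr0 : 0 ≤ n % 10 ^ m := Int.emod_nonneg n (ne_of_gt hp)
    have hr1 : n % 10 ^ m < 10 ^ m := Int.emod_lt_of_pos n hp
    have h3 := Int.ediv_add_emod n (10 ^ m)
    have h4 : dsum n = dsum (n / 10 ^ m) + dsum (n % 10 ^ m) := by
      conv_lhs => rw [show n = (n / 10 ^ m) * 10 ^ m + n % 10 ^ m by
        have h8 : (n / 10 ^ m) * 10 ^ m = 10 ^ m * (n / 10 ^ m) := mul_comm _ _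
        omega]
      exact dsum_add_mul_pow m _ _ hq hr0 hr1
    have h5 := dsum_le_self hr0
    have h6 := ih hq
    omega

-- the suffix num % 10^m grows (weakly) with m, for num ≥ 0
lemma emod_pow_mono {n : Int} (h : 0 ≤ n) {a b : Nat} (hab : a ≤ b) :
    n % 10 ^ a ≤ n % 10 ^ b := by
  have hd : (10:Int) ^ a ∣ 10 ^ b := pow_dvd_pow 10 hab
  have h1 : n % 10 ^ b % 10 ^ a = n % 10 ^ a := Int.emod_emod_of_dvd n hd
  have h2 : 0 ≤ n % 10 ^ b := Int.emod_nonneg n (ne_of_gt (pow10_pos b))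
  have h3 : n % 10 ^ b % 10 ^ a ≤ n % 10 ^ b := emod_le_self _ _ h2 (pow10_pos a)
  omega

-- memo correctness invariant
def GoodMemo (memo : PySem.Dict (Int × Int) Bool) : Prop :=
  ∀ p b, PySem.Dict.get? memo p = some b → (b = true ↔ SplitSum p.1 p.2)

lemma goodMemo_empty : GoodMemo PySem.Dict.empty := by
  intro p b hb
  simp [pysem] at hb

lemma goodMemo_insert {memo : PySem.Dict (Int × Int) Bool} (h : GoodMemo memo)
    {n t : Int} {b : Bool} (hb : b = true ↔ SplitSum n t) :
    GoodMemo (PySem.Dict.insert memo (n, t) b) := by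
  intro p c hc
  rw [PySem.Dict.get?_insert] at hc
  split_ifs at hc with hp
  · cases hc; subst hp; exact hb
  · exact h p c hc

-- if every way of peeling a non-empty suffix fails, only the whole-number split remains
lemma not_splitSum_of_failures {num target : Int} (h0 : 0 ≤ num) (hne : num ≠ target)
    (hfail : ∀ m : Nat, 1 ≤ m → (10:Int) ^ m ≤ num →
      ¬ SplitSum (num / 10 ^ m) (target - num % 10 ^ m)) :
    ¬ SplitSum num target := by
  intro hs
  rcases splitSum_cases hs with he | ⟨m, t, hm1, hm2, hts, he⟩
  · exact hne he.symm
  · exact hfail m hm1 hm2 (by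
      have : target - num % 10 ^ m = t := by omega
      rw [this]; exact hts)

lemma pow_ge_ge {a : Int} {m k : Nat} (h : (10:Int) ^ m ≤ a) (hk : k ≤ m) : (10:Int) ^ k ≤ a :=
  le_trans (pow_le_pow_right₀ (by norm_num) hk) h

-- fuel bookkeeping: enough fuel survives each level of the recursion
lemma ten_mul_le_pow (k : Nat) : 10 * (k + 1) ≤ 10 ^ (k + 1) := by
  induction k with
  | zero => norm_num
  | succ k ih =>
    have : (10:Nat) ^ (k + 1 + 1) = 10 * 10 ^ (k + 1) := by ring
    omega

lemma fuel_step {num : Int} {k : Nat} (h0 : 0 ≤ num) (hguard : (10:Int) ^ (k + 1) ≤ num) :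
    (num / 10 ^ (k + 1)).toNat + k + 2 ≤ num.toNat := by
  have hp := pow10_pos (k + 1)
  have hp0 : 0 ≤ num / 10 ^ (k + 1) := Int.ediv_nonneg h0 hp.le
  have h1 : 10 ^ (k + 1) * (num / 10 ^ (k + 1)) + num % 10 ^ (k + 1) = num :=
    Int.ediv_add_emod num (10 ^ (k + 1))
  have h1b := Int.emod_nonneg num (ne_of_gt hp)
  have h10 : (10:Int) ≤ 10 ^ (k + 1) := by
    calc (10:Int) = 10 ^ 1 := by ring
    _ ≤ 10 ^ (k + 1) := pow_le_pow_right₀ (by norm_num) (by omega)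
  have h2 : 10 * (num / 10 ^ (k + 1)) ≤ 10 ^ (k + 1) * (num / 10 ^ (k + 1)) :=
    mul_le_mul_of_nonneg_right h10 hp0
  have h3 : ((10:Int)) * ((k:Int) + 1) ≤ 10 ^ (k + 1) := by
    have := ten_mul_le_pow k
    have hc : (((10 * (k + 1) : Nat)) : Int) ≤ (((10:Nat) ^ (k + 1) : Nat) : Int) := by
      exact_mod_cast this
    push_cast at hc
    calc ((10:Int)) * ((k:Int) + 1) = ((10 * k + 10 : Int)) := by ring
    _ ≤ 10 ^ (k + 1) := by push_cast at hc ⊢; linarith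
  omega

lemma k_lt_of_pow_le {num : Int} {k : Nat} (h : (10:Int) ^ k ≤ num) : k < num.toNat := by
  have h1 : k < 10 ^ k := Nat.lt_pow_self (by omega)
  have h2 : (((10:Nat) ^ k : Nat) : Int) = (10:Int) ^ k := by push_cast; ring
  omega

-- dfs and its inner loop compute SplitSum and keep the memo good, given enough fuel
lemma dfs_loop_ok : ∀ F : Nat,
    (∀ (num target : Int) (memo : PySem.Dict (Int × Int) Bool),
      0 ≤ num → num.toNat + 3 ≤ F → GoodMemo memo →
      ((pyDfs F num target memo).1 = true ↔ SplitSum num target) ∧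
        GoodMemo (pyDfs F num target memo).2) ∧
    (∀ (num target : Int) (k : Nat) (memo : PySem.Dict (Int × Int) Bool),
      0 ≤ num → num ≠ target → (k = 0 ∨ (10:Int) ^ k ≤ num) → num.toNat + 2 ≤ F + k →
      GoodMemo memo →
      (∀ m : Nat, 1 ≤ m → m ≤ k →
        ¬ ((10:Int) ^ m ≤ num ∧ SplitSum (num / 10 ^ m) (target - num % 10 ^ m))) →
      ((pyDfsLoop F num target k memo).1 = true ↔ SplitSum num target) ∧
        GoodMemo (pyDfsLoop F num target k memo).2) := by
  intro F
  induction F with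
  | zero =>
    constructor
    · intro num target memo h0 hF hg
      omega
    · intro num target k memo h0 hne hkinv hF hg hfail
      rcases hkinv with hk | hk
      · omega
      · have := k_lt_of_pow_le hk
        omega
  | succ f ih =>
    constructor
    -- ===== pyDfs (f+1) =====
    · intro num target memo h0 hF hg
      rw [pyDfs]
      by_cases b1 : target < 0 ∨ target > num
      · simp only [b1, if_true]
        have hns : ¬ SplitSum num target := by
          intro hs
          have := splitSum_nonneg hs h0
          have := splitSum_le hs h0
          omega
        exact ⟨by simp [hns], hg⟩
      · simp only [b1, if_false]
        by_cases b2 : num = target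
        · simp only [b2, if_true]
          exact ⟨by simp [b2 ▸ SplitSum.whole num], hg⟩
        · simp only [b2, if_false]
          by_cases b3 : num = 0
          · simp only [b3, if_true]
            constructor
            · constructor
              · intro hb
                have : target = 0 := by simpa using hb
                subst this; subst b3
                exact SplitSum.whole 0
              · intro hs
                rcases splitSum_cases hs with he | ⟨m, t, hm1, hm2, hts, he⟩
                · subst b3; simp [he]
                · subst b3
                  have := pow10_pos m
                  omega
            · exact hg
          · simp only [b3, if_false]
            by_cases b4 : PySem.Int.mod (num - target) 9 ≠ 0
            · rw [if_pos b4]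
              have hns : ¬ SplitSum num target := by
                intro hs
                have hdvd := splitSum_mod9 hs
                exact b4 ((PySem.Int.mod_eq_zero_iff_dvd _ _).mpr hdvd)
              exact ⟨by simp [hns], hg⟩
            · rw [if_neg b4]
              rcases hgetm : PySem.Dict.get? memo (num, target) with _ | cached
              · simp only
                by_cases b6 : target < 120 ∧ digit_sum num > target
                · simp only [b6, if_true]
                  have hns : ¬ SplitSum num target := by
                    intro hs
                    have h1 := splitSum_dsum_le hs h0
                    have h2 := digit_sum_eq h0
                    omega
                  exact ⟨by simp [hns], goodMemo_insert hg (by simp [hns])⟩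
                · simp only [b6, if_false]
                  exact ih.2 num target 0 memo h0 b2 (Or.inl rfl) (by omega) hg
                    (by intro m hm1 hmk; omega)
              · simp only
                exact ⟨hg _ _ hgetm, hg⟩
    -- ===== pyDfsLoop (f+1) =====
    · intro num target k memo h0 hne hkinv hF hg hfail
      rw [pyDfsLoop]
      by_cases hguard : (10:Int) ^ (k + 1) ≤ num
      · simp only [hguard, if_true]
        have hmod : PySem.Int.mod num (10 ^ (k + 1)) = num % 10 ^ (k + 1) :=
          PySem.Int.mod_eq_emod_of_pos (pow10_pos (k + 1))
        have hfd : PySem.Int.floordiv num (10 ^ (k + 1)) = num / 10 ^ (k + 1) :=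
          PySem.Int.floordiv_eq_ediv_of_pos (pow10_pos (k + 1))
        by_cases hbrk : num % 10 ^ (k + 1) > target
        · simp only [hmod, hbrk, if_true]
          have hns : ¬ SplitSum num target := by
            apply not_splitSum_of_failures h0 hne
            intro m hm1 hm2 hts
            by_cases hmk : m ≤ k
            · exact hfail m hm1 hmk ⟨hm2, hts⟩
            · have h1 : num % 10 ^ (k + 1) ≤ num % 10 ^ m := emod_pow_mono h0 (by omega)
              have h2 : 0 ≤ num / 10 ^ m := Int.ediv_nonneg h0 (pow10_pos m).le
              have h3 := splitSum_nonneg hts h2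
              omega
          exact ⟨by simp [hns], goodMemo_insert hg (by simp [hns])⟩
        · simp only [hmod, hbrk, if_false]
          have hpfx0 : 0 ≤ num / 10 ^ (k + 1) := Int.ediv_nonneg h0 (pow10_pos (k + 1)).le
          have hstep := fuel_step h0 hguard
          obtain ⟨hiff, hgood⟩ := ih.1 (num / 10 ^ (k + 1)) (target - num % 10 ^ (k + 1))
            memo hpfx0 (by omega) hg
          rw [hfd]
          rcases hres : pyDfs f (num / 10 ^ (k + 1)) (target - num % 10 ^ (k + 1)) memo
            with ⟨b, memo'⟩
          rw [hres] at hiff hgood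
          match b with
          | true =>
            simp only
            have hsp : SplitSum num target := by
              have h1 := SplitSum.peel num _ (k + 1) (by omega) hguard (hiff.mp rfl)
              have h2 : num % 10 ^ (k + 1) + (target - num % 10 ^ (k + 1)) = target := by omega
              rwa [h2] at h1
            exact ⟨by simp [hsp], goodMemo_insert hgood (by simp [hsp])⟩
          | false =>
            simp only
            apply ih.2 num target (k + 1) memo' h0 hne (Or.inr hguard) (by omega) hgood
            intro m hm1 hmk
            by_cases hmk' : m ≤ k
            · exact hfail m hm1 hmk'
            · have hmeq : m = k + 1 := by omega
              subst hmeq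
              rintro ⟨_, hts⟩
              exact (by simpa using hiff.mpr hts : False)
      · simp only [hguard, if_false]
        have hns : ¬ SplitSum num target := by
          apply not_splitSum_of_failures h0 hne
          intro m hm1 hm2 hts
          by_cases hmk : m ≤ k
          · exact hfail m hm1 hmk ⟨hm2, hts⟩
          · exact hguard (pow_ge_ge hm2 (by omega))
        exact ⟨by simp [hns], goodMemo_insert hg (by simp [hns])⟩

lemma top_ok (root sq : Int) (hsq : 0 ≤ sq) :
    ∀ (F k : Nat) (memo : PySem.Dict (Int × Int) Bool),
    (k = 0 ∨ (10:Int) ^ k ≤ sq) → sq.toNat + 2 ≤ F + k → GoodMemo memo →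
    (∀ m : Nat, 1 ≤ m → m ≤ k → ¬ ((10:Int) ^ m ≤ sq ∧ SplitSum (sq / 10 ^ m) (root - sq % 10 ^ m))) →
    (pyTopLoop F root sq k memo = true ↔
      ∃ m : Nat, 1 ≤ m ∧ (10:Int) ^ m ≤ sq ∧ SplitSum (sq / 10 ^ m) (root - sq % 10 ^ m)) := by
  intro F
  induction F with
  | zero =>
    intro k memo hkinv hF hg hfail
    rcases hkinv with hk | hk
    · omega
    · have := k_lt_of_pow_le hk
      omega
  | succ f ih =>
    intro k memo hkinv hF hg hfail
    rw [pyTopLoop]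
    by_cases hguard : (10:Int) ^ (k + 1) ≤ sq
    · simp only [hguard, if_true]
      have hmod : PySem.Int.mod sq (10 ^ (k + 1)) = sq % 10 ^ (k + 1) :=
        PySem.Int.mod_eq_emod_of_pos (pow10_pos (k + 1))
      have hfd : PySem.Int.floordiv sq (10 ^ (k + 1)) = sq / 10 ^ (k + 1) :=
        PySem.Int.floordiv_eq_ediv_of_pos (pow10_pos (k + 1))
      by_cases hbrk : sq % 10 ^ (k + 1) > root
      · simp only [hmod, hbrk, if_true, Bool.false_eq_true, false_iff]
        rintro ⟨m, hm1, hm2, hts⟩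
        by_cases hmk : m ≤ k
        · exact hfail m hm1 hmk ⟨hm2, hts⟩
        · have h1 : sq % 10 ^ (k + 1) ≤ sq % 10 ^ m := emod_pow_mono hsq (by omega)
          have h2 : 0 ≤ sq / 10 ^ m := Int.ediv_nonneg hsq (pow10_pos m).le
          have h3 := splitSum_nonneg hts h2
          omega
      · simp only [hmod, hbrk, if_false, hfd]
        have hpfx0 : 0 ≤ sq / 10 ^ (k + 1) := Int.ediv_nonneg hsq (pow10_pos (k + 1)).le
        have hstep := fuel_step hsq hguard
        obtain ⟨hiff, hgood⟩ := (dfs_loop_ok f).1 (sq / 10 ^ (k + 1))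
          (root - sq % 10 ^ (k + 1)) memo hpfx0 (by omega) hg
        by_cases h9 : PySem.Int.mod (sq / 10 ^ (k + 1) - (root - sq % 10 ^ (k + 1))) 9 = 0
        · rw [if_pos h9]
          rcases hres : pyDfs f (sq / 10 ^ (k + 1)) (root - sq % 10 ^ (k + 1)) memo
            with ⟨b, memo'⟩
          rw [hres] at hiff hgood
          match b with
          | true =>
            simp only [true_iff]
            exact ⟨k + 1, by omega, hguard, hiff.mp rfl⟩
          | false =>
            simp only
            rw [ih (k + 1) memo' (Or.inr hguard) (by omega) hgood]
            intro m hm1 hmk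
            by_cases hmk' : m ≤ k
            · exact hfail m hm1 hmk'
            · have hmeq : m = k + 1 := by omega
              subst hmeq
              rintro ⟨_, hts⟩
              exact (by simpa using hiff.mpr hts : False)
        · rw [if_neg h9]
          rw [ih (k + 1) memo (Or.inr hguard) (by omega) hg]
          intro m hm1 hmk
          by_cases hmk' : m ≤ k
          · exact hfail m hm1 hmk'
          · have hmeq : m = k + 1 := by omega
            subst hmeq
            rintro ⟨_, hts⟩
            have hdvd := splitSum_mod9 hts
            exact h9 ((PySem.Int.mod_eq_zero_iff_dvd _ _).mpr hdvd)
    · simp only [hguard, if_false, Bool.false_eq_true, false_iff]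
      rintro ⟨m, hm1, hm2, hts⟩
      by_cases hmk : m ≤ k
      · exact hfail m hm1 hmk ⟨hm2, hts⟩
      · exact hguard (pow_ge_ge hm2 (by omega))

lemma A_iff (root : Int) : is_s_number_root root = true ↔
    (10 ≤ root * root ∧
      ∃ m : Nat, 1 ≤ m ∧ (10:Int) ^ m ≤ root * root ∧
        SplitSum (root * root / 10 ^ m) (root - root * root % 10 ^ m)) := by
  unfold is_s_number_root
  by_cases hlt : root * root < 10
  · simp only [hlt, if_true, Bool.false_eq_true, false_iff]
    rintro ⟨h10, _⟩
    omega
  · simp only [hlt, if_false]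
    have hsq0 : 0 ≤ root * root := mul_self_nonneg root
    rw [top_ok root (root * root) hsq0 ((root * root).toNat + 2) 0 PySem.Dict.empty
      (Or.inl rfl) (by omega) goodMemo_empty (by intro m hm1 hmk; omega)]
    constructor
    · intro h
      exact ⟨by omega, h⟩
    · rintro ⟨_, h⟩
      exact h

lemma root_lt_sq {root : Int} (h : 10 ≤ root * root) : root < root * root := by
  by_cases h1 : root ≤ 1
  · omega
  · nlinarith

lemma peel_iff_splitSum {root : Int} (h : 10 ≤ root * root) :
    (∃ m : Nat, 1 ≤ m ∧ (10:Int) ^ m ≤ root * root ∧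
        SplitSum (root * root / 10 ^ m) (root - root * root % 10 ^ m)) ↔
      SplitSum (root * root) root := by
  constructor
  · rintro ⟨m, h1, h2, h3⟩
    have := SplitSum.peel (root * root) _ m h1 h2 h3
    simpa using this
  · intro hs
    rcases splitSum_cases hs with h1 | ⟨m, t, h1, h2, ht, hst⟩
    · exact absurd h1 (by have := root_lt_sq h; omega)
    · exact ⟨m, h1, h2, by
        have : root - root * root % 10 ^ m = t := by omega
        rw [this]; exact ht⟩

-- ===== B side =====
def nlen (n : Int) : Nat :=
  if h : 0 < n then nlen (n / 10) + 1 else 0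
termination_by n.toNat
decreasing_by
  have h1 : n / 10 < n := by
    apply Int.ediv_lt_of_lt_mul (by norm_num)
    nlinarith
  have h2 : 0 ≤ n / 10 := Int.ediv_nonneg (by omega) (by norm_num)
  omega

lemma nlen_zero : nlen 0 = 0 := by rw [nlen]; simp

lemma altLenGo_eq : ∀ (f : Nat) (n : Int) (L0 : Nat), 0 ≤ n → n.toNat < f →
    altLenGo f n L0 = L0 + nlen n := by
  intro f
  induction f with
  | zero => intro n L0 h0 hf; omega
  | succ f ih =>
    intro n L0 h0 hf
    by_cases hn : n = 0
    · subst hn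
      simp [altLenGo, nlen_zero]
    · have hpos : 0 < n := by omega
      have hfd : PySem.Int.floordiv n 10 = n / 10 :=
        PySem.Int.floordiv_eq_ediv_of_pos (by norm_num)
      have hlt : n / 10 < n := by
        apply Int.ediv_lt_of_lt_mul (by norm_num)
        nlinarith
      have hge : 0 ≤ n / 10 := Int.ediv_nonneg h0 (by norm_num)
      have := ih (n / 10) (L0 + 1) hge (by omega)
      simp only [altLenGo, hn, if_true, ne_eq, not_false_eq_true, hfd]
      rw [this]
      conv_rhs => rw [nlen]
      simp only [hpos, dite_true]
      omega

lemma nlen_upper (n : Int) (h : 0 ≤ n) : n < 10 ^ (nlen n) := by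
  by_cases hn : 0 < n
  · have hlt : n / 10 < n := by
      apply Int.ediv_lt_of_lt_mul (by norm_num)
      nlinarith
    have hge : 0 ≤ n / 10 := Int.ediv_nonneg h (by norm_num)
    have ih := nlen_upper (n / 10) hge
    rw [nlen]
    simp only [hn, dite_true]
    have h4 := Int.ediv_add_emod n 10
    have h5 := Int.emod_lt_of_pos n (show (0:Int) < 10 by norm_num)
    have : (10:Int) ^ (nlen (n / 10) + 1) = 10 * 10 ^ (nlen (n / 10)) := by ring
    rw [this]
    omega
  · rw [nlen]
    simp only [hn, dite_false]
    omega
termination_by n.toNat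
decreasing_by omega

lemma nlen_pos {n : Int} (h : 0 < n) : 1 ≤ nlen n := by
  rw [nlen]; simp [h]

lemma nlen_lower (n : Int) (h : 0 < n) : (10:Int) ^ (nlen n - 1) ≤ n := by
  by_cases hn : 10 ≤ n
  · have hge : 0 < n / 10 := by
      have : (1:Int) ≤ n / 10 := by
        rw [Int.le_ediv_iff_mul_le (by norm_num)]
        omega
      omega
    have ih := nlen_lower (n / 10) hge
    have hp1 : 1 ≤ nlen (n / 10) := nlen_pos hge
    rw [nlen]
    simp only [h, dite_true]
    have h6 : (10:Int) ^ (nlen (n / 10) + 1 - 1) = 10 ^ (nlen (n / 10) - 1) * 10 := by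
      rw [← pow_succ]; congr 1; omega
    rw [h6]
    have h7 : (10:Int) ^ (nlen (n / 10) - 1) * 10 ≤ (n / 10) * 10 :=
      mul_le_mul_of_nonneg_right ih (by norm_num)
    have h8 : (n / 10) * 10 = 10 * (n / 10) := mul_comm _ _
    have h4 := Int.ediv_add_emod n 10
    have h5 := Int.emod_nonneg n (by norm_num : (10:Int) ≠ 0)
    omega
  · have h1 : n / 10 = 0 := by omega
    rw [nlen]
    simp only [h, dite_true]
    rw [h1, nlen_zero]
    simp
    omega
termination_by n.toNat
decreasing_by omega

-- membership in the conditional add-fold of Source B's innermost loop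
lemma mem_foldl_add_if {α : Type} (F : α → Int) (P : α → Prop) [DecidablePred P] :
    ∀ (l : List α) (s : PySem.Set Int) (x : Int),
    (x ∈ l.foldl (fun c a => if P a then PySem.Set.add c (F a) else c) s) ↔
      x ∈ s ∨ ∃ a ∈ l, P a ∧ x = F a := by
  intro l
  induction l with
  | nil => simp
  | cons hd tl ih =>
    intro s x
    simp only [List.foldl_cons, ih]
    by_cases hp : P hd
    · simp only [hp, if_true, PySem.Set.mem_add, List.mem_cons]
      aesop
    · simp only [hp, if_false, List.mem_cons]
      aesop

-- membership after Source B's two inner loops (over enumerate(tables) and each prev set)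
lemma mem_pair_fold (pk root : Int) :
    ∀ (l : List (Int × PySem.Set Int)) (s0 : PySem.Set Int) (x : Int),
    (x ∈ l.foldl
        (fun c p =>
          p.2.foldl
            (fun c t => if PySem.Int.mod pk (10 ^ (p.1.toNat + 1)) + t ≤ root then
                PySem.Set.add c (PySem.Int.mod pk (10 ^ (p.1.toNat + 1)) + t) else c) c)
        s0) ↔
      x ∈ s0 ∨ ∃ p ∈ l, ∃ t ∈ p.2,
        PySem.Int.mod pk (10 ^ (p.1.toNat + 1)) + t ≤ root ∧
          x = PySem.Int.mod pk (10 ^ (p.1.toNat + 1)) + t := by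
  intro l
  induction l with
  | nil => simp
  | cons hd tl ih =>
    intro s0 x
    simp only [List.foldl_cons, ih, List.mem_cons]
    rw [mem_foldl_add_if (fun t => PySem.Int.mod pk (10 ^ (hd.1.toNat + 1)) + t)
      (fun t => PySem.Int.mod pk (10 ^ (hd.1.toNat + 1)) + t ≤ root) hd.2 s0 x]
    constructor
    · rintro ((hx | ⟨t, ht, hc, he⟩) | ⟨p, hp, t, ht, hc, he⟩)
      · exact Or.inl hx
      · exact Or.inr ⟨hd, Or.inl rfl, t, ht, hc, he⟩
      · exact Or.inr ⟨p, Or.inr hp, t, ht, hc, he⟩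
    · rintro (hx | ⟨p, hp | hp, t, ht, hc, he⟩)
      · exact Or.inl (Or.inl hx)
      · subst hp; exact Or.inl (Or.inr ⟨t, ht, hc, he⟩)
      · exact Or.inr ⟨p, hp, t, ht, hc, he⟩

lemma mem_altCur (sq root : Int) (k : Nat) (tables : List (PySem.Set Int)) (x : Int) :
    x ∈ altCur sq root k tables ↔
      ((PySem.Int.floordiv sq (10 ^ k) ≤ root ∧ x = PySem.Int.floordiv sq (10 ^ k)) ∨
        ∃ (i : Nat) (h : i < tables.length), ∃ t ∈ tables[i],
          PySem.Int.mod (PySem.Int.floordiv sq (10 ^ k)) (10 ^ (i + 1)) + t ≤ root ∧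
            x = PySem.Int.mod (PySem.Int.floordiv sq (10 ^ k)) (10 ^ (i + 1)) + t) := by
  unfold altCur
  rw [mem_pair_fold]
  have hcur0 : ∀ y : Int,
      (y ∈ (if PySem.Int.floordiv sq (10 ^ k) ≤ root then
          PySem.Set.add PySem.Set.empty (PySem.Int.floordiv sq (10 ^ k)) else PySem.Set.empty)) ↔
        (PySem.Int.floordiv sq (10 ^ k) ≤ root ∧ y = PySem.Int.floordiv sq (10 ^ k)) := by
    intro y
    split_ifs with hc
    · rw [PySem.Set.mem_add]
      simp only [PySem.Set.empty, List.not_mem_nil, false_or]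
      tauto
    · simp only [PySem.Set.empty, List.not_mem_nil, false_iff]
      tauto
  rw [hcur0]
  constructor
  · rintro (hx | ⟨p, hp, t, ht, hc, he⟩)
    · exact Or.inl hx
    · rcases (PySem.List.mem_enumerate_iff _ _ _).mp hp with ⟨i, hi, rfl⟩
      refine Or.inr ⟨i, hi, t, ht, ?_, ?_⟩
      · simpa using hc
      · simpa using he
  · rintro (hx | ⟨i, hi, t, ht, hc, he⟩)
    · exact Or.inl hx
    · refine Or.inr ⟨((i : Int), tables[i]), ?_, t, ht, ?_, ?_⟩
      · exact (PySem.List.mem_enumerate_iff _ _ _).mpr ⟨i, hi, by simp⟩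
      · simpa using hc
      · simpa using he

lemma altBuild_spec (sq root : Int) (L : Nat) (hL : L = nlen sq) (hsq : 10 ≤ sq) :
    ∀ c : Nat, c ≤ L →
      (altBuild sq root L c).length = c ∧
      ∀ i : Nat, i < c → ∀ x : Int,
        (x ∈ (altBuild sq root L c).getD i PySem.Set.empty ↔
          (SplitSum (sq / 10 ^ (L - c + i)) x ∧ x ≤ root)) := by
  have hsq0 : (0:Int) ≤ sq := by omega
  have hup : sq < 10 ^ L := by rw [hL]; exact nlen_upper sq hsq0
  have hlo : (10:Int) ^ (L - 1) ≤ sq := by rw [hL]; exact nlen_lower sq (by omega)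
  intro c
  induction c with
  | zero => intro _; simp [altBuild]
  | succ c ih =>
    intro hc1
    obtain ⟨hlen, hmem⟩ := ih (by omega)
    constructor
    · simp [altBuild, hlen]
    · intro i hi x
      set k := L - 1 - c with hk
      have hkL : k + c + 1 = L := by omega
      match i with
      | 0 =>
        have hfd : PySem.Int.floordiv sq (10 ^ k) = sq / 10 ^ k :=
          PySem.Int.floordiv_eq_ediv_of_pos (pow10_pos k)
        set pk := sq / 10 ^ k with hpk
        have hpk0 : 0 ≤ pk := Int.ediv_nonneg hsq0 (pow10_pos k).le
        have hpk_lo : (10:Int) ^ c ≤ pk := by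
          rw [hpk, Int.le_ediv_iff_mul_le (pow10_pos k), ← pow_add]
          calc (10:Int) ^ (c + k) = 10 ^ (L - 1) := by congr 1; omega
            _ ≤ sq := hlo
        have hpk_hi : pk < 10 ^ (c + 1) := by
          rw [hpk, Int.ediv_lt_iff_lt_mul (pow10_pos k), ← pow_add]
          calc sq < 10 ^ L := hup
            _ ≤ 10 ^ (c + 1 + k) := pow_le_pow_right₀ (by norm_num) (by omega)
        have hdd : ∀ m : Nat, pk / 10 ^ m = sq / 10 ^ (k + m) := by
          intro m
          rw [hpk, Int.ediv_ediv_of_nonneg (pow10_pos k).le, ← pow_add]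
        have hgd : (altBuild sq root L (c + 1)).getD 0 PySem.Set.empty =
            altCur sq root (L - 1 - c) (altBuild sq root L c) := by
          simp [altBuild]
        rw [hgd]
        rw [mem_altCur]
        constructor
        · rintro (⟨hle, he⟩ | ⟨i, hi2, t, ht, hcond, he⟩)
          · rw [hfd] at he hle
            subst he
            refine ⟨?_, hle⟩
            have hkk : L - (c + 1) + 0 = k := by omega
            rw [hkk]
            exact SplitSum.whole pk
          · rw [hlen] at hi2
            have hmd : PySem.Int.mod (PySem.Int.floordiv sq (10 ^ k)) (10 ^ (i + 1)) =
                pk % 10 ^ (i + 1) := by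
              rw [hfd]; exact PySem.Int.mod_eq_emod_of_pos (pow10_pos (i + 1))
            rw [hmd] at hcond he
            have htm : t ∈ (altBuild sq root L c).getD i PySem.Set.empty := by
              rw [List.getD_eq_getElem _ _ (by omega : i < (altBuild sq root L c).length)]
              exact ht
            obtain ⟨hts, htr⟩ := (hmem i hi2 t).mp htm
            have hts' : SplitSum (pk / 10 ^ (i + 1)) t := by
              rw [hdd (i + 1)]
              have : k + (i + 1) = L - c + i := by omega
              rw [this]; exact hts
            have hpow : (10:Int) ^ (i + 1) ≤ pk := by
              calc (10:Int) ^ (i + 1) ≤ 10 ^ c := pow_le_pow_right₀ (by norm_num) (by omega)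
                _ ≤ pk := hpk_lo
            have := SplitSum.peel pk t (i + 1) (by omega) hpow hts'
            subst he
            refine ⟨?_, hcond⟩
            have hkk : L - (c + 1) + 0 = k := by omega
            rw [hkk]
            exact this
        · rintro ⟨hs, hxr⟩
          have hkk : L - (c + 1) + 0 = k := by omega
          rw [hkk] at hs
          rcases splitSum_cases hs with he | ⟨m, t, hm1, hm2, hts, he⟩
          · exact Or.inl ⟨by rw [hfd]; omega, by rw [hfd]; omega⟩
          · have hmc : m ≤ c := by
              by_contra hmc
              have : (10:Int) ^ (c + 1) ≤ 10 ^ m := pow_le_pow_right₀ (by norm_num) (by omega)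
              omega
            have hmd : PySem.Int.mod (PySem.Int.floordiv sq (10 ^ k)) (10 ^ (m - 1 + 1)) =
                pk % 10 ^ (m - 1 + 1) := by
              rw [hfd]; exact PySem.Int.mod_eq_emod_of_pos (pow10_pos (m - 1 + 1))
            have hm1' : m - 1 + 1 = m := by omega
            have hsuf0 : 0 ≤ pk % 10 ^ m := Int.emod_nonneg pk (ne_of_gt (pow10_pos m))
            have hts2 : SplitSum (sq / 10 ^ (L - c + (m - 1))) t := by
              have : L - c + (m - 1) = k + m := by omega
              rw [this, ← hdd m]; exact hts
            have htr : t ≤ root := by omega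
            refine Or.inr ⟨m - 1, by omega, ?_⟩
            have hi2 : m - 1 < (altBuild sq root L c).length := by omega
            refine ⟨t, ?_, ?_, ?_⟩
            · have := (hmem (m - 1) (by omega) t).mpr ⟨hts2, htr⟩
              rw [List.getD_eq_getElem _ _ hi2] at this
              exact this
            · rw [hmd, hm1', ← he]; exact hxr
            · rw [hmd, hm1']; exact he
      | Nat.succ i' =>
        have hgd : (altBuild sq root L (c + 1)).getD (i' + 1) PySem.Set.empty =
            (altBuild sq root L c).getD i' PySem.Set.empty := by
          simp [altBuild]
        rw [hgd]
        have : L - (c + 1) + (i' + 1) = L - c + i' := by omega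
        rw [this]
        exact hmem i' (by omega) x

lemma B_iff (root : Int) : is_s_number_root_alt root = true ↔
    (10 ≤ root * root ∧ SplitSum (root * root) root) := by
  unfold is_s_number_root_alt
  by_cases hlt : root * root < 10
  · simp only [hlt, if_true, Bool.false_eq_true, false_iff]
    rintro ⟨h10, _⟩
    omega
  · simp only [hlt, if_false]
    set sq := root * root with hsq
    have hsq10 : 10 ≤ sq := by omega
    have hsq0 : (0:Int) ≤ sq := by omega
    have hLen : altLenGo (sq.toNat + 1) sq 0 = nlen sq := by
      have := altLenGo_eq (sq.toNat + 1) sq 0 hsq0 (by omega)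
      omega
    rw [hLen]
    set L := nlen sq with hL
    have hL1 : 1 ≤ L := nlen_pos (by omega)
    obtain ⟨hlen, hmem⟩ := altBuild_spec sq root L rfl hsq10 L (le_refl L)
    have hhd : (altBuild sq root L L).headD PySem.Set.empty =
        (altBuild sq root L L).getD 0 PySem.Set.empty := by
      obtain ⟨n, hn⟩ : ∃ n, L = n + 1 := ⟨L - 1, by omega⟩
      rw [hn]
      simp [altBuild]
    rw [hhd]
    rw [PySem.Set.contains_iff]
    rw [hmem 0 (by omega) root]
    have h00 : L - L + 0 = 0 := by omega
    rw [h00]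
    simp only [pow_zero, Int.ediv_one]
    constructor
    · rintro ⟨hs, _⟩
      exact ⟨hsq10, hs⟩
    · rintro ⟨_, hs⟩
      exact ⟨hs, le_refl root⟩


-- ===== VERDICT (by name: the statement is the Claim_ definition above) =====
theorem is_s_number_root_spec : Claim_equal_is_s_number_root := by
  intro root _
  unfold Spec_is_s_number_root
  rw [Bool.eq_iff_iff, A_iff, B_iff]
  by_cases h10 : 10 ≤ root * root
  · rw [and_congr_right_iff.mpr (fun _ => peel_iff_splitSum h10)]
  · constructor
    · rintro ⟨h, _⟩; omega
    · rintro ⟨h, _⟩; omega
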